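-- pv_equiv track=rewrite | github.com/prasojojiwandono/logic | cp3.py | helper
-- ===== SOURCE A (Python) =====
-- def helper(n, x, memo):
--     if n == 1 or n == 0:
--         return 1
--     if memo[n] != None:
--         return memo[n]
--     total = 0
--     for i in x:
--         if n-i >= 0:
--             total += helper(n-i, x, memo)
--     memo[n] = total
--     return total
-- ===== SOURCE B (Python) =====
-- def helper(n, x, memo):
--     # Bottom-up iterative DP over the same recurrence (return value only; does not mutate memo).
--     if n == 0 or n == 1:
--         return 1
--     m = memo[n]
--     if m is not None:
--         return m
--     f = {}
--     for i in range(2, n + 1):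
--         mi = memo[i]
--         if mi is not None:
--             f[i] = mi
--         else:
--             t = 0
--             for v in x:
--                 j = i - v
--                 if j >= 0:
--                     t += 1 if j <= 1 else f[j]
--             f[i] = t
--     return f[n]
-- ===== Notes on version B (the rewrite author's own statement) =====
-- stated objective: alternative
-- what changed: Replaces top-down memoized recursion (which mutates memo) with a bottom-up iterative DP that fills a fresh table for indices 2..n; Pre_ excludes negative n with memo[n] unfilled (A returns 0 via Python negative-index wraparound where B raises KeyError), n >= len(memo) for n >= 2 (A raises IndexError), and, when memo[n] is unfilled, step lists containing a nonpositive value (A then diverges/raises except accidental prefilled-memo cases where B raises KeyError).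
-- outside the precondition, e.g. on helper(-2, [1], [None, None, 5]): A returns 0, B raises KeyError; on helper(2, [-1], [None, None, None, 5]): A returns 5, B raises KeyError
import Mathlib
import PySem

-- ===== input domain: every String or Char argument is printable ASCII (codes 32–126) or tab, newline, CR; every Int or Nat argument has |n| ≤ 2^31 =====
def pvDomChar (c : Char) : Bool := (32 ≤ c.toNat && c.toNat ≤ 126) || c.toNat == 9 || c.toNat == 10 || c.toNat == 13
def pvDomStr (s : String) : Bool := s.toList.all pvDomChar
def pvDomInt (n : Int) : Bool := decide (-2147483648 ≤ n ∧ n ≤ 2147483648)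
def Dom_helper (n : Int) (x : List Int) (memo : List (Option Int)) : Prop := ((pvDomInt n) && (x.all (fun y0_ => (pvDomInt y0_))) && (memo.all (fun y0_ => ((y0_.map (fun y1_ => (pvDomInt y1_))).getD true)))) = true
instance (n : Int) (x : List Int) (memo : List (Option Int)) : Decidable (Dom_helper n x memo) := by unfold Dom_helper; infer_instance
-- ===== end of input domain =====

-- B replaces A's top-down memoized recursion by a bottom-up iterative DP table (objective: alternative).
-- A mutates `memo` in place; B does not — the equivalence proved here is about the RETURN value only.

-- ===== PORT A =====
-- A is recursive and mutates `memo`; the port threads the memo list through a fuel-bounded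
-- recursion (fuel n.toNat+1 suffices on Pre_, where every recursive call strictly decreases n ≥ 0);
-- `none` marks the inputs where Python raises (IndexError / exhausted fuel = unbounded recursion).
mutual
def helperA (fuel : Nat) (n : Int) (x : List Int) (memo : List (Option Int)) :
    Option (Int × List (Option Int)) :=
  match fuel with
  | 0 => none
  | fuel + 1 =>
    if n = 1 ∨ n = 0 then some (1, memo)
    else
      match PySem.List.pyGet? memo n with
      | none => none                                  -- IndexError on memo[n]
      | some (some v) => some (v, memo)               -- memo[n] != None
      | some none =>
        match helperLoop fuel n x x memo 0 with       -- for i in x: …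
        | none => none
        | some (total, memo1) =>
          match PySem.List.pySet? memo1 n (some total) with  -- memo[n] = total
          | none => none
          | some memo2 => some (total, memo2)
  termination_by (fuel, 0)

def helperLoop (fuel : Nat) (n : Int) (x ys : List Int) (memo : List (Option Int))
    (total : Int) : Option (Int × List (Option Int)) :=
  match ys with
  | [] => some (total, memo)
  | i :: ys' =>
    if n - i ≥ 0 then
      match helperA fuel (n - i) x memo with
      | none => none
      | some (r, memo') => helperLoop fuel n x ys' memo' (total + r)
    else helperLoop fuel n x ys' memo total
  termination_by (fuel, ys.length + 1)
end

def helper (n : Int) (x : List Int) (memo : List (Option Int)) : Int :=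
  match helperA (n.toNat + 1) n x memo with
  | some (t, _) => t
  | none => 0

-- ===== PORT B =====
def helper_alt (n : Int) (x : List Int) (memo : List (Option Int)) : Int :=
  if n = 0 ∨ n = 1 then 1
  else
    match PySem.List.pyGetD memo n none with          -- m = memo[n] (in range on Pre_)
    | some m => m
    | none =>
      let f := (PySem.List.pyRange 2 (n + 1) 1).foldl
        (fun (f : PySem.Dict Int Int) i =>
          match PySem.List.pyGetD memo i none with    -- mi = memo[i]
          | some mi => f.insert i mi
          | none =>
            let t := x.foldl (fun t v =>
              let j := i - v
              if j ≥ 0 then t + (if j ≤ 1 then 1 else f.getD j 0) else t) 0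
            f.insert i t)
        PySem.Dict.empty
      f.getD n 0

-- ===== PRECONDITION & SPEC =====
-- Pre_ excludes: negative n with memo[n] unfilled (A returns 0 via Python negative-index wraparound
-- where B raises KeyError), n outside memo's index range for n ≥ 2 (A raises IndexError), and — when
-- memo[n] is unfilled — step lists containing a nonpositive value (A then recurses without bound,
-- except accidental prefilled-memo cases where B raises KeyError).
def Pre_helper (n : Int) (x : List Int) (memo : List (Option Int)) : Prop :=
  n = 0 ∨ n = 1 ∨
    (2 ≤ n ∧ n < (memo.length : Int) ∧
      (PySem.List.pyGetD memo n none ≠ none ∨ ∀ i ∈ x, 1 ≤ i)) ∨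
    (-(memo.length : Int) ≤ n ∧ n ≤ -1 ∧ PySem.List.pyGetD memo n none ≠ none)
instance (n : Int) (x : List Int) (memo : List (Option Int)) : Decidable (Pre_helper n x memo) := by
  unfold Pre_helper; infer_instance

def pvWitness_helper : Int × List Int × List (Option Int) :=
  (4, [1, 2], [none, none, none, none, none])

def Spec_helper (n : Int) (x : List Int) (memo : List (Option Int)) (out : Int) : Prop := out = helper_alt n x memo
instance (n : Int) (x : List Int) (memo : List (Option Int)) (out : Int) : Decidable (Spec_helper n x memo out) := by unfold Spec_helper; infer_instance

-- ===== CLAIM (what is proved, stated in full; the proofs are below) =====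
def Claim_equal_helper : Prop := ∀ (n : Int) (x : List Int) (memo : List (Option Int)), Dom_helper n x memo → Pre_helper n x memo → Spec_helper n x memo (helper n x memo)

-- ===== LEMMAS AND PROOFS =====

-- The mathematical value of the recurrence, read against the ORIGINAL memo `memo0`
-- (fuel-indexed; stable once fuel > k, see Fmemo_stable).
def Fmemo (x : List Int) (memo0 : List (Option Int)) : Nat → Int → Int
  | 0, _ => 0
  | fuel + 1, k =>
    if k = 0 ∨ k = 1 then 1
    else
      match PySem.List.pyGetD memo0 k none with
      | some v => v
      | none => x.foldl (fun t i => if k - i ≥ 0 then t + Fmemo x memo0 fuel (k - i) else t) 0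

def Fk (x : List Int) (memo0 : List (Option Int)) (k : Int) : Int :=
  Fmemo x memo0 (k.toNat + 1) k

-- A-side invariant: memo agrees with memo0 except that some unfilled entries k ≥ 2 now hold Fk k.
def AInv (x : List Int) (memo0 memo : List (Option Int)) : Prop :=
  memo.length = memo0.length ∧
    ∀ k : Int, 2 ≤ k → k < (memo0.length : Int) →
      (PySem.List.pyGetD memo k none = PySem.List.pyGetD memo0 k none ∨
        (PySem.List.pyGetD memo0 k none = none ∧
          PySem.List.pyGetD memo k none = some (Fk x memo0 k)))

theorem Fmemo_stable (x : List Int) (memo0 : List (Option Int))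
    (hx : ∀ i ∈ x, 1 ≤ i) :
    ∀ f1 f2 : Nat, ∀ k : Int, 0 ≤ k → k < (f1 : Int) → k < (f2 : Int) →
      Fmemo x memo0 f1 k = Fmemo x memo0 f2 k := by
  intro f1
  induction f1 with
  | zero => intro f2 k h0 h1 h2; omega
  | succ a IH =>
    intro f2 k h0 h1 h2
    match f2, h2 with
    | 0, h2 => omega
    | b + 1, h2 =>
      show Fmemo x memo0 (a+1) k = Fmemo x memo0 (b+1) k
      unfold Fmemo
      by_cases hk : k = 0 ∨ k = 1
      · simp [hk]
      · simp only [if_neg hk]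
        cases hm : PySem.List.pyGetD memo0 k none with
        | some v => rfl
        | none =>
          simp only []
          apply PySem.List.foldl_congr_mem
          intro t i hi
          by_cases hg : k - i ≥ 0
          · have h1i : 1 ≤ i := hx i hi
            rw [if_pos hg, if_pos hg, IH b (k - i) (by omega) (by omega) (by omega)]
          · rw [if_neg hg, if_neg hg]

-- Value of Fk at the base cases and at a filled / unfilled index.
theorem Fk_base (x : List Int) (memo0 : List (Option Int)) (n : Int) (h : n = 1 ∨ n = 0) :
    Fk x memo0 n = 1 := by
  unfold Fk Fmemo; rw [if_pos (by tauto)]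

theorem Fk_filled (x : List Int) (memo0 : List (Option Int)) (n : Int) (v : Int)
    (h2 : 2 ≤ n) (hm : PySem.List.pyGetD memo0 n none = some v) :
    Fk x memo0 n = v := by
  unfold Fk Fmemo
  rw [if_neg (by omega), hm]

theorem Fk_open (x : List Int) (memo0 : List (Option Int)) (n : Int)
    (hx : ∀ i ∈ x, 1 ≤ i) (h2 : 2 ≤ n)
    (hm : PySem.List.pyGetD memo0 n none = none) :
    Fk x memo0 n =
      x.foldl (fun t i => if n - i ≥ 0 then t + Fk x memo0 (n - i) else t) 0 := by
  conv_lhs => unfold Fk Fmemo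
  rw [if_neg (by omega), hm]
  apply PySem.List.foldl_congr_mem
  intro t i hi
  by_cases hg : n - i ≥ 0
  · have h1i : 1 ≤ i := hx i hi
    have hn : ((n.toNat : Nat) : Int) = n := Int.toNat_of_nonneg (by omega)
    rw [if_pos hg, if_pos hg]
    unfold Fk
    rw [Fmemo_stable x memo0 hx n.toNat ((n - i).toNat + 1) (n - i) (by omega)
      (by omega) (by omega)]
  · rw [if_neg hg, if_neg hg]

theorem helperA_correct (x : List Int) (memo0 : List (Option Int))
    (hx : ∀ i ∈ x, 1 ≤ i) :
    ∀ fuel : Nat, ∀ (n : Int) (memo : List (Option Int)),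
      0 ≤ n → (n ≤ 1 ∨ n < (memo0.length : Int)) → AInv x memo0 memo →
      n < (fuel : Int) →
      ∃ memo', helperA fuel n x memo = some (Fk x memo0 n, memo') ∧ AInv x memo0 memo' := by
  intro fuel
  induction fuel with
  | zero => intro n memo h0 _ _ hlt; omega
  | succ fuel IH =>
    intro n memo h0 hcase hInv hlt
    by_cases hn01 : n = 1 ∨ n = 0
    · refine ⟨memo, ?_, hInv⟩
      unfold helperA
      rw [if_pos hn01, Fk_base x memo0 n hn01]
    · have hn2 : 2 ≤ n := by omega
      have hnL : n < (memo0.length : Int) := by rcases hcase with h | h; omega; exact h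
      have hlen : memo.length = memo0.length := hInv.1
      have hnlt : n.toNat < memo.length := by omega
      have hgetD : PySem.List.pyGetD memo n none = memo[n.toNat] :=
        PySem.List.pyGetD_eq_getElem memo none (by omega) (by omega)
      have hget : PySem.List.pyGet? memo n = some (memo[n.toNat]) :=
        PySem.List.pyGet?_eq_some_getElem memo (by omega) (by omega)
      cases hmn : (memo[n.toNat]'hnlt : Option Int) with
      | some v =>
        refine ⟨memo, ?_, hInv⟩
        have hv : v = Fk x memo0 n := by
          rcases hInv.2 n hn2 hnL with heq | ⟨_, hsome⟩
          · exact (Fk_filled x memo0 n v hn2 (by rw [← heq, hgetD, hmn])).symm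
          · rw [hgetD, hmn] at hsome; exact (Option.some.injEq _ _).mp hsome
        unfold helperA
        rw [if_neg hn01, hget, hmn, hv]
      | none =>
        have h0' : PySem.List.pyGetD memo0 n none = none := by
          rcases hInv.2 n hn2 hnL with heq | ⟨_, hsome⟩
          · rw [← heq, hgetD, hmn]
          · rw [hgetD, hmn] at hsome; exact absurd hsome (by simp)
        -- the loop over x
        have loop : ∀ ys : List Int, (∀ i ∈ ys, 1 ≤ i) →
            ∀ (total : Int) (memo1 : List (Option Int)), AInv x memo0 memo1 →
            ∃ memo', helperLoop fuel n x ys memo1 total =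
              some (ys.foldl (fun t i => if n - i ≥ 0 then t + Fk x memo0 (n - i) else t) total, memo') ∧
              AInv x memo0 memo' := by
          intro ys
          induction ys with
          | nil => intro _ total memo1 hInv1; exact ⟨memo1, by simp [helperLoop], hInv1⟩
          | cons i ys' IHl =>
            intro hys total memo1 hInv1
            have h1i : 1 ≤ i := hys i (List.mem_cons_self)
            by_cases hg : n - i ≥ 0
            · obtain ⟨memo2, hA, hInv2⟩ := IH (n - i) memo1 (by omega) (by omega) hInv1 (by omega)
              obtain ⟨memo', hL, hInv'⟩ :=
                IHl (fun j hj => hys j (List.mem_cons_of_mem i hj)) (total + Fk x memo0 (n - i)) memo2 hInv2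
              refine ⟨memo', ?_, hInv'⟩
              unfold helperLoop
              rw [if_pos hg, hA]
              dsimp only
              rw [hL, List.foldl_cons, if_pos hg]
            · obtain ⟨memo', hL, hInv'⟩ :=
                IHl (fun j hj => hys j (List.mem_cons_of_mem i hj)) total memo1 hInv1
              refine ⟨memo', ?_, hInv'⟩
              unfold helperLoop
              rw [if_neg hg, hL, List.foldl_cons, if_neg hg]
        obtain ⟨memo1, hLoop, hInv1⟩ := loop x hx 0 memo hInv
        have hlen1 : memo1.length = memo0.length := hInv1.1
        set total := x.foldl (fun t i => if n - i ≥ 0 then t + Fk x memo0 (n - i) else t) 0 with htot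
        have htotF : total = Fk x memo0 n := (Fk_open x memo0 n hx hn2 h0').symm
        have hn' : ((n.toNat : Nat) : Int) = n := Int.toNat_of_nonneg (by omega)
        have hset : PySem.List.pySet? memo1 n (some total) =
            some (memo1.set n.toNat (some total)) := by
          rw [← hn']
          exact PySem.List.pySet?_natCast memo1 n.toNat (some total) (by omega)
        refine ⟨memo1.set n.toNat (some total), ?_, ?_⟩
        · unfold helperA
          rw [if_neg hn01, hget, hmn, hLoop]
          dsimp only
          rw [hset, htotF]
        · constructor
          · simp [hlen1]
          · intro k hk2 hkL
            have hget2 : PySem.List.pyGetD (memo1.set n.toNat (some total)) k none =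
                (memo1.set n.toNat (some total))[k.toNat]'(by simp; omega) :=
              PySem.List.pyGetD_eq_getElem _ none (by omega) (by simp; omega)
            by_cases hkn : k = n
            · right
              refine ⟨by rw [hkn]; exact h0', ?_⟩
              rw [hget2]
              simp only [hkn, List.getElem_set_self, htotF]
            · have hknN : k.toNat ≠ n.toNat := by omega
              have hk1 : PySem.List.pyGetD memo1 k none = memo1[k.toNat]'(by omega) :=
                PySem.List.pyGetD_eq_getElem _ none (by omega) (by omega)
              rcases hInv1.2 k hk2 hkL with heq | ⟨hz, hsome⟩
              · left; rw [hget2, List.getElem_set_ne (by omega), ← hk1, heq]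
              · right; refine ⟨hz, ?_⟩; rw [hget2, List.getElem_set_ne (by omega), ← hk1, hsome]

-- B-side: the DP fold of helper_alt, named for the proofs.
def bfold (x : List Int) (memo : List (Option Int)) (m : Int) : PySem.Dict Int Int :=
  (PySem.List.pyRange 2 m 1).foldl
    (fun (f : PySem.Dict Int Int) i =>
      match PySem.List.pyGetD memo i none with
      | some mi => f.insert i mi
      | none =>
        let t := x.foldl (fun t v =>
          let j := i - v
          if j ≥ 0 then t + (if j ≤ 1 then 1 else f.getD j 0) else t) 0
        f.insert i t)
    PySem.Dict.empty

theorem helper_alt_eq (n : Int) (x : List Int) (memo : List (Option Int))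
    (h01 : ¬(n = 0 ∨ n = 1)) (hm : PySem.List.pyGetD memo n none = none) :
    helper_alt n x memo = (bfold x memo (n + 1)).getD n 0 := by
  unfold helper_alt bfold
  rw [if_neg h01, hm]

theorem bfold_getD (x : List Int) (memo : List (Option Int)) (hx : ∀ i ∈ x, 1 ≤ i) :
    ∀ j : Nat, ∀ k : Int, 2 ≤ k → k < 2 + (j : Int) →
      (bfold x memo (2 + (j : Int))).getD k 0 = Fk x memo k := by
  intro j
  induction j with
  | zero => intro k h1 h2; simp at h2; omega
  | succ j IHj =>
    intro k hk2 hklt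
    unfold bfold
    rw [show (2 + ((j + 1 : Nat) : Int)) = (2 + (j : Int)) + 1 by push_cast; ring,
      PySem.List.pyRange_one_succ_right (by omega), List.foldl_append, List.foldl_cons,
      List.foldl_nil]
    have hfold : (PySem.List.pyRange 2 (2 + (j : Int)) 1).foldl
        (fun (f : PySem.Dict Int Int) i =>
          match PySem.List.pyGetD memo i none with
          | some mi => f.insert i mi
          | none =>
            let t := x.foldl (fun t v =>
              let j := i - v
              if j ≥ 0 then t + (if j ≤ 1 then 1 else f.getD j 0) else t) 0
            f.insert i t)
        PySem.Dict.empty = bfold x memo (2 + (j : Int)) := rfl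
    rw [hfold]
    set m : Int := 2 + (j : Int) with hm
    by_cases hkm : k = m
    · rw [hkm]
      cases hmi : PySem.List.pyGetD memo m none with
      | some mi =>
        dsimp only
        rw [PySem.Dict.getD_insert_self]
        exact (Fk_filled x memo m mi (by omega) hmi).symm
      | none =>
        dsimp only
        rw [PySem.Dict.getD_insert_self, Fk_open x memo m hx (by omega) hmi]
        apply PySem.List.foldl_congr_mem
        intro t v hv
        have h1v : 1 ≤ v := hx v hv
        by_cases hg : m - v ≥ 0
        · rw [if_pos hg, if_pos hg]
          by_cases hsmall : m - v ≤ 1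
          · rw [if_pos hsmall, Fk_base x memo (m - v) (by omega)]
          · rw [if_neg hsmall, IHj (m - v) (by omega) (by omega)]
        · rw [if_neg hg, if_neg hg]
    · cases hmi : PySem.List.pyGetD memo m none with
      | some mi =>
        dsimp only
        rw [PySem.Dict.getD_insert_of_ne _ _ _ hkm]
        exact IHj k hk2 (by omega)
      | none =>
        dsimp only
        rw [PySem.Dict.getD_insert_of_ne _ _ _ hkm]
        exact IHj k hk2 (by omega)

-- A filled pyGetD read implies a successful pyGet? read (any index, wraparound included).
theorem pyGet?_of_pyGetD_some (memo : List (Option Int)) (n : Int) (v : Int)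
    (h : PySem.List.pyGetD memo n none = some v) :
    PySem.List.pyGet? memo n = some (some v) := by
  unfold PySem.List.pyGetD at h
  cases hg : PySem.List.pyGet? memo n with
  | none => rw [hg] at h; simp at h
  | some o => rw [hg] at h; simp at h; rw [h]

-- A returns memo[n] untouched when it is already filled (no hypothesis on x needed).
theorem helperA_filled (fuel : Nat) (n : Int) (x : List Int) (memo : List (Option Int))
    (v : Int) (hn01 : ¬(n = 1 ∨ n = 0))
    (hv : PySem.List.pyGetD memo n none = some v) :
    helperA (fuel + 1) n x memo = some (v, memo) := by
  unfold helperA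
  rw [if_neg hn01, pyGet?_of_pyGetD_some memo n v hv]

theorem helper_spec : Claim_equal_helper := by
  unfold Claim_equal_helper
  intro n x memo _ hpre
  unfold Spec_helper
  rcases hpre with h0 | h1 | ⟨hn2, hnL, hrest⟩ | ⟨hneg1, hneg2, hfill⟩
  · subst h0; simp [helper, helperA, helper_alt]
  · subst h1; simp [helper, helperA, helper_alt]
  · have hn01 : ¬(n = 1 ∨ n = 0) := by omega
    have h01' : ¬(n = 0 ∨ n = 1) := by omega
    cases hmn : PySem.List.pyGetD memo n none with
    | some v =>
      unfold helper
      rw [helperA_filled n.toNat n x memo v hn01 hmn]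
      unfold helper_alt
      rw [if_neg h01', hmn]
    | none =>
      have hx : ∀ i ∈ x, 1 ≤ i := by
        rcases hrest with hfill | hx
        · exact absurd hmn hfill
        · exact hx
      obtain ⟨memo', hA, _⟩ := helperA_correct x memo hx (n.toNat + 1) n memo (by omega)
        (Or.inr hnL) ⟨rfl, fun k _ _ => Or.inl rfl⟩ (by omega)
      unfold helper
      rw [hA]
      rw [helper_alt_eq n x memo h01' hmn]
      have hcast : (2 : Int) + (((n - 1).toNat : Nat) : Int) = n + 1 := by omega
      rw [← hcast, bfold_getD x memo hx (n - 1).toNat n hn2 (by omega)]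
  · have hn01 : ¬(n = 1 ∨ n = 0) := by omega
    have h01' : ¬(n = 0 ∨ n = 1) := by omega
    cases hmn : PySem.List.pyGetD memo n none with
    | some v =>
      unfold helper
      rw [helperA_filled n.toNat n x memo v hn01 hmn]
      unfold helper_alt
      rw [if_neg h01', hmn]
    | none => exact absurd hmn hfill
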